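-- pv_equiv track=rewrite | github.com/kevin14fe/Voting-Rules | voting.py | veto
-- ===== SOURCE A (Python) =====
-- def veto(preferences, tie_break):
--
--     """The veto function inputs a dictionary of preferences and a tie-break method, and returns the index of the winning alternative based on the Veto rule."""
--
--     # Initialize a dictionary to store the points for each alternative.
--     points = {}
--
--     # Iterates through the keys (i.e., indices) and values (i.e., rankings) in the preferences dictionary, and for each alternative in the ranking, it increments its points by 1 if
--     # it is not the last alternative in the ranking. This means that every alternative except the last one in the ranking gets 1 point.
--     for agent, pref in preferences.items():
--         for i, alt in enumerate(pref):
--             if alt not in points: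
--                 points[alt] = 0
--             if i != len(pref) - 1:  # Give 1 point to every alternative except the last one.
--                 points[alt] += 1
--
--     # Find the maximum number of points.
--     max_points = max(points.values())
--
--     # Find the alternatives with the maximum number of points.
--     winners = [alt for alt, pt in points.items() if pt == max_points]
--
--     if len(winners) == 1:
--         return winners[0]  # Return the only winner.
--
--     # If there is a tie, apply the tie-breaking rule.
--     return tie_breaking(preferences, tie_break, winners)
--
-- def tie_breaking(preferences, tieBreak, winner):
--
--     """The tie_breaking function inputs a dictionary of preferences, a tie-break method, and a list of winners (i.e., alternatives that have tied), and returns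
--     the index of the winning alternative based on the tie-break method specified."""
--
--     # Returns the maximum element in the winner list.
--     if tieBreak == 'max':
--         return max(winner)
--
--     # Returns the minimum element in the winner list.
--     elif tieBreak == 'min':
--         return min(winner)
--
--     # Tie-break method is an integer representing the index of an agent, and the function returns the highest-ranked alternative in the ranking of the specified agent that is also a winner.
--     else:
--         if tieBreak in preferences.keys():
--             for values in preferences[tieBreak]:
--                 if values in winner:
--                     return values
-- ===== SOURCE B (Python) =====
-- def veto(preferences, tie_break):
--     """Veto winner: score by two separate tallies (total appearances minus one
--     veto per non-empty ranking for its last-placed alternative)."""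
--
--     # Tally 1: total appearances of each alternative (also fixes the key order).
--     appearances = {}
--     for pref in preferences.values():
--         for alt in pref:
--             appearances[alt] = appearances.get(alt, 0) + 1
--
--     # Tally 2: one veto per non-empty ranking, against its last alternative.
--     vetoes = {}
--     for pref in preferences.values():
--         if pref:
--             last = pref[-1]
--             vetoes[last] = vetoes.get(last, 0) + 1
--
--     points = {alt: cnt - vetoes.get(alt, 0) for alt, cnt in appearances.items()}
--
--     max_points = max(points.values())
--     winners = [alt for alt, pt in points.items() if pt == max_points]
--     if len(winners) == 1:
--         return winners[0]
--     return tie_breaking(preferences, tie_break, winners)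
--
-- def tie_breaking(preferences, tieBreak, winner):
--     if tieBreak == 'max':
--         return max(winner)
--     elif tieBreak == 'min':
--         return min(winner)
--     else:
--         if tieBreak in preferences.keys():
--             for values in preferences[tieBreak]:
--                 if values in winner:
--                     return values
-- ===== Notes on version B (the rewrite author's own statement) =====
-- stated objective: alternative
-- what changed: B replaces A's per-position 'increment unless last index' enumerate loop by two independent tallies -- a plain appearance count over all rankings and a veto count of each non-empty ranking's last alternative -- and forms points[alt] = appearances[alt] - vetoes.get(alt, 0) in a dict comprehension; the max/winners selection and tie_breaking stay as in A.
-- outside the precondition, e.g. on veto({0: [1, 2], 1: [2, 1]}, 5): A returns None, B returns None; on veto({0: []}, 0): A raises ValueError, B raises ValueError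
import Mathlib
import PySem

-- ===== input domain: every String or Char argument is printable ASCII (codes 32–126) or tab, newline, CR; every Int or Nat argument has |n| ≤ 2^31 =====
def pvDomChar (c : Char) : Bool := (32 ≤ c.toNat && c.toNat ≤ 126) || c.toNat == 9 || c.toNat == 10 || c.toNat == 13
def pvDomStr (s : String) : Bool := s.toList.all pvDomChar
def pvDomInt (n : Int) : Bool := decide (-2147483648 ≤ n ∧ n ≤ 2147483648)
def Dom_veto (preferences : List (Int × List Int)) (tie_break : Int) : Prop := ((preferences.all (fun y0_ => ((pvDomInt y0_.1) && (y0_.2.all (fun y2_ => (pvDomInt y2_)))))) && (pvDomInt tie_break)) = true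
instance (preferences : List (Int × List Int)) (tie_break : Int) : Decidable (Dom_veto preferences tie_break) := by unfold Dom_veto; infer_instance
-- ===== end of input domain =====

-- B scores by two independent tallies (appearance counts minus one veto per non-empty
-- ranking) instead of A's per-position increment loop; same cost, different decomposition.
-- NB: `tie_break` is an int, so Python's `tieBreak == 'max'` / `== 'min'` branches in
-- tie_breaking are always False and only the agent-lookup branch is ported.

-- ===== PORT A =====
-- shared helper: both Pythons contain the identical `tie_breaking` function
-- (`tieBreak in preferences.keys()` / `preferences[tieBreak]` = first-match lookup;
-- the `for … if … return` scan is `find?`; falling off the end returns None)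
def vetoTieBreak (preferences : List (Int × List Int)) (tieBreak : Int)
    (winner : List Int) : Option Int :=
  match preferences.find? (fun p => p.1 == tieBreak) with
  | some pr => pr.2.find? (fun v => winner.contains v)
  | none => none

-- inner `for i, alt in enumerate(pref)` loop of A
def vetoInnerA (pref : List Int) (pts : PySem.Dict Int Int) : PySem.Dict Int Int :=
  (PySem.List.enumerate pref).foldl (fun pts ia =>
    let pts1 := if pts.contains ia.2 then pts else pts.insert ia.2 0
    if ia.1 ≠ PySem.List.len pref - 1 then pts1.modify ia.2 0 (· + 1) else pts1) pts

def vetoPointsA (preferences : List (Int × List Int)) : PySem.Dict Int Int :=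
  preferences.foldl (fun pts pr => vetoInnerA pr.2 pts) PySem.Dict.empty

def veto (preferences : List (Int × List Int)) (tie_break : Int) : Int :=
  let points := vetoPointsA preferences
  let max_points := (PySem.List.max? points.values (fun v => v)).getD 0  -- max() on empty raises: excluded by Pre_
  let winners := (points.items.filter (fun p => p.2 == max_points)).map (·.1)
  if winners.length = 1 then PySem.List.pyGetD winners 0 0
  else (vetoTieBreak preferences tie_break winners).getD 0  -- None (no key / no winner found) excluded by Pre_

-- ===== PORT B =====
-- tally 1: appearances[alt] = appearances.get(alt, 0) + 1 over every ranking
def vetoAppearances (preferences : List (Int × List Int)) : PySem.Dict Int Int :=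
  preferences.foldl (fun d pr => pr.2.foldl (fun d alt => d.modify alt 0 (· + 1)) d)
    PySem.Dict.empty

-- tally 2: one veto per non-empty ranking against pref[-1]
def vetoVetoes (preferences : List (Int × List Int)) : PySem.Dict Int Int :=
  preferences.foldl (fun d pr =>
    if pr.2.isEmpty then d
    else d.modify (PySem.List.pyGetD pr.2 (-1) 0) 0 (· + 1)) PySem.Dict.empty

def veto_alt (preferences : List (Int × List Int)) (tie_break : Int) : Int :=
  let appear := vetoAppearances preferences
  let vetoes := vetoVetoes preferences
  let points := PySem.Dict.ofList
    (appear.items.map (fun p => (p.1, p.2 - vetoes.getD p.1 0)))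
  let max_points := (PySem.List.max? points.values (fun v => v)).getD 0
  let winners := (points.items.filter (fun p => p.2 == max_points)).map (·.1)
  if winners.length = 1 then PySem.List.pyGetD winners 0 0
  else (vetoTieBreak preferences tie_break winners).getD 0

-- ===== PRECONDITION & SPEC =====
-- spec-level (count-based) description of the veto scores, used only by Pre_
def vetoFlatSpec (preferences : List (Int × List Int)) : List Int :=
  (preferences.map (·.2)).flatten

def vetoLastsSpec (preferences : List (Int × List Int)) : List Int :=
  preferences.filterMap (fun p => p.2.getLast?)

def vetoScoreSpec (preferences : List (Int × List Int)) (alt : Int) : Int :=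
  ((vetoFlatSpec preferences).count alt : Int) - ((vetoLastsSpec preferences).count alt : Int)

def vetoWinnersSpec (preferences : List (Int × List Int)) : List Int :=
  let alts := PySem.Set.ofList (vetoFlatSpec preferences)
  let M := (PySem.List.max? (alts.map (vetoScoreSpec preferences)) (fun v => v)).getD 0
  alts.filter (fun a => vetoScoreSpec preferences a == M)

-- Pre_ excludes: (a) association lists with duplicate agent keys (a Python dict cannot
-- carry them); (b) inputs where all rankings are empty, on which A raises ValueError in
-- max(); (c) tied inputs where tie_break is not an agent or that agent's ranking meets
-- no tied alternative, on which A falls off tie_breaking and returns None, not an int.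
def Pre_veto (preferences : List (Int × List Int)) (tie_break : Int) : Prop :=
  (preferences.map (·.1)).Nodup ∧
  vetoFlatSpec preferences ≠ [] ∧
  ((vetoWinnersSpec preferences).length = 1 ∨
    ((((preferences.find? (fun p => p.1 == tie_break)).map (·.2)).getD []).any
      (fun v => (vetoWinnersSpec preferences).contains v)) = true)
instance (preferences : List (Int × List Int)) (tie_break : Int) : Decidable (Pre_veto preferences tie_break) := by unfold Pre_veto; infer_instance

def pvWitness_veto : (List (Int × List Int)) × Int := ([(0, [1, 2]), (1, [2, 1])], 1)

def Spec_veto (preferences : List (Int × List Int)) (tie_break : Int) (out : Int) : Prop := out = veto_alt preferences tie_break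
instance (preferences : List (Int × List Int)) (tie_break : Int) (out : Int) : Decidable (Spec_veto preferences tie_break out) := by unfold Spec_veto; infer_instance

-- ===== CLAIM (what is proved, stated in full; the proofs are below) =====
def Claim_equal_veto : Prop := ∀ (preferences : List (Int × List Int)) (tie_break : Int), Dom_veto preferences tie_break → Pre_veto preferences tie_break → Spec_veto preferences tie_break (veto preferences tie_break)

-- ===== LEMMAS AND PROOFS =====

-- `if contains then d else insert 0` is setdefault
theorem veto_setdefault_form (d : PySem.Dict Int Int) (a : Int) :
    (if d.contains a then d else d.insert a 0) = d.setdefault a 0 := by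
  by_cases h : d.contains a
  · rw [PySem.Dict.setdefault_of_contains _ _ h]; simp [h]
  · rw [PySem.Dict.setdefault_of_not_contains _ _ (by simpa using h)]; simp [h]

-- setdefault with the lookup default does not change any getD-at-0 value
theorem veto_getD_setdefault (d : PySem.Dict Int Int) (a k : Int) :
    (d.setdefault a 0).getD k 0 = d.getD k 0 := by
  by_cases h : d.contains a
  · rw [PySem.Dict.setdefault_of_contains _ _ h]
  · rw [PySem.Dict.setdefault_of_not_contains _ _ (by simpa using h)]
    by_cases hk : k = a
    · subst hk
      rw [PySem.Dict.getD_insert_self, PySem.Dict.getD_of_not_contains d _ (by simpa using h)]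
    · rw [PySem.Dict.getD_insert_of_ne _ _ _ hk]

theorem veto_keys_setdefault (d : PySem.Dict Int Int) (a : Int) :
    (d.setdefault a 0).keys = PySem.Set.add d.keys a := by
  by_cases h : d.contains a
  · rw [PySem.Dict.setdefault_of_contains _ _ h]
    have hm : a ∈ d.keys := (PySem.Dict.contains_iff_mem_keys d a).mp h
    show _ = if d.keys.contains a then d.keys else d.keys ++ [a]
    simp [hm]
  · rw [PySem.Dict.setdefault_of_not_contains _ _ (by simpa using h)]
    rw [PySem.Dict.keys_insert_of_not_contains _ _ (by simpa using h)]
    have hm : a ∉ d.keys := fun hc => h ((PySem.Dict.contains_iff_mem_keys d a).mpr hc)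
    show _ = if d.keys.contains a then d.keys else d.keys ++ [a]
    simp [hm]

-- after setdefault-ing the key, the += 1 is a plain modify
theorem veto_modify_setdefault (d : PySem.Dict Int Int) (a : Int) :
    (d.setdefault a 0).modify a 0 (· + 1) = d.modify a 0 (· + 1) := by
  by_cases h : d.contains a
  · rw [PySem.Dict.setdefault_of_contains _ _ h]
  · rw [PySem.Dict.setdefault_of_not_contains _ _ (by simpa using h)]
    simp [PySem.Dict.modify, PySem.Dict.insert_insert_self, PySem.Dict.getD_insert_self,
      PySem.Dict.getD_of_not_contains _ _ (by simpa using h : d.contains a = false)]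

-- the inner A loop on pref = ys ++ [z] counts every element of ys, then only
-- registers the key of z
theorem veto_innerA_append (ys : List Int) (z : Int) (d : PySem.Dict Int Int) :
    vetoInnerA (ys ++ [z]) d
      = (ys.foldl (fun d a => d.modify a 0 (· + 1)) d).setdefault z 0 := by
  unfold vetoInnerA
  rw [PySem.List.enumerate_append, List.foldl_append]
  have hys : (PySem.List.enumerate ys 0).foldl (fun pts (ia : Int × Int) =>
      let pts1 := if pts.contains ia.2 then pts else pts.insert ia.2 0
      if ia.1 ≠ PySem.List.len (ys ++ [z]) - 1 then pts1.modify ia.2 0 (· + 1) else pts1) d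
      = (PySem.List.enumerate ys 0).foldl (fun pts (ia : Int × Int) =>
          pts.modify ia.2 0 (· + 1)) d := by
    apply PySem.List.foldl_congr_mem
    intro acc ia hia
    obtain ⟨k, hk, rfl⟩ := (PySem.List.mem_enumerate_iff ys 0 ia).mp hia
    have hne : (0 + (k : Int)) ≠ PySem.List.len (ys ++ [z]) - 1 := by
      simp [PySem.List.len_eq]; omega
    simp only [veto_setdefault_form]
    rw [if_pos hne]
    exact veto_modify_setdefault acc ys[k]
  rw [hys]
  have henum : (PySem.List.enumerate ys 0).foldl (fun pts (ia : Int × Int) =>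
      pts.modify ia.2 0 (· + 1)) d = ys.foldl (fun d a => d.modify a 0 (· + 1)) d := by
    conv_rhs => rw [← PySem.List.map_snd_enumerate ys 0]
    rw [List.foldl_map]
  rw [henum]
  have hsingle : PySem.List.enumerate [z] (0 + (ys.length : Int)) = [((ys.length : Int), z)] := by
    simp [PySem.List.enumerate_cons, PySem.List.enumerate_nil]
  rw [hsingle]
  have hlast : ¬ ((ys.length : Int) ≠ PySem.List.len (ys ++ [z]) - 1) := by
    simp [PySem.List.len_eq]
  simp only [List.foldl_cons, List.foldl_nil, veto_setdefault_form]
  rw [if_neg hlast]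

-- getD through the whole A fold = appearances − vetoes, count-wise
theorem veto_pointsA_getD (preferences : List (Int × List Int)) (d : PySem.Dict Int Int) (alt : Int) :
    ((preferences.foldl (fun pts pr => vetoInnerA pr.2 pts) d).getD alt 0)
      = d.getD alt 0 + ((vetoFlatSpec preferences).count alt : Int)
          - ((vetoLastsSpec preferences).count alt : Int) := by
  induction preferences generalizing d with
  | nil => simp [vetoFlatSpec, vetoLastsSpec]
  | cons pr rest ih =>
    obtain ⟨ag, pref⟩ := pr
    rw [List.foldl_cons, ih]
    rcases List.eq_nil_or_concat pref with hnil | ⟨ys, z, hc⟩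
    · subst hnil
      have h0 : vetoInnerA [] d = d := rfl
      simp [h0, vetoFlatSpec, vetoLastsSpec]
    · subst hc
      rw [List.concat_eq_append, veto_innerA_append, veto_getD_setdefault,
        PySem.Dict.getD_foldl_modify_add_one]
      have hflat : vetoFlatSpec ((ag, ys ++ [z]) :: rest)
          = (ys ++ [z]) ++ vetoFlatSpec rest := by simp [vetoFlatSpec]
      have hlasts : vetoLastsSpec ((ag, ys ++ [z]) :: rest)
          = z :: vetoLastsSpec rest := by
        simp [vetoLastsSpec]
      rw [hflat, hlasts]
      simp only [List.count_append, List.count_cons]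
      by_cases hz : z = alt
      · subst hz; simp; omega
      · have hz' : ¬ alt = z := fun h => hz h.symm
        simp [hz]; omega

theorem veto_pointsA_keys (preferences : List (Int × List Int)) (d : PySem.Dict Int Int) :
    (preferences.foldl (fun pts pr => vetoInnerA pr.2 pts) d).keys
      = PySem.Set.update d.keys (vetoFlatSpec preferences) := by
  induction preferences generalizing d with
  | nil => simp [vetoFlatSpec]
  | cons pr rest ih =>
    obtain ⟨ag, pref⟩ := pr
    rw [List.foldl_cons, ih]
    have hflat : vetoFlatSpec ((ag, pref) :: rest) = pref ++ vetoFlatSpec rest := by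
      simp [vetoFlatSpec]
    rw [hflat]
    have hupd : ∀ (s : PySem.Set Int) (xs yszs : List Int),
        PySem.Set.update s (xs ++ yszs) = PySem.Set.update (PySem.Set.update s xs) yszs := by
      intro s xs yszs
      show (xs ++ yszs).foldl PySem.Set.add s = _
      rw [List.foldl_append]; rfl
    rw [hupd]
    congr 1
    rcases List.eq_nil_or_concat pref with hnil | ⟨ys, z, hc⟩
    · subst hnil; rfl
    · subst hc
      rw [List.concat_eq_append, veto_innerA_append, veto_keys_setdefault,
        PySem.Dict.keys_foldl_modify ys (0 : Int) (fun _ _ v => v + 1) d]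
      rw [hupd]
      rfl

theorem veto_appear_eq (preferences : List (Int × List Int)) :
    vetoAppearances preferences = PySem.Dict.counter (vetoFlatSpec preferences) := by
  rw [PySem.Dict.counter_eq_foldl]
  unfold vetoFlatSpec vetoAppearances
  rw [List.foldl_flatten, List.foldl_map]

theorem veto_vetoes_getD (preferences : List (Int × List Int)) (d : PySem.Dict Int Int) (alt : Int) :
    ((preferences.foldl (fun d pr =>
        if pr.2.isEmpty then d
        else d.modify (PySem.List.pyGetD pr.2 (-1) 0) 0 (· + 1)) d).getD alt 0)
      = d.getD alt 0 + ((vetoLastsSpec preferences).count alt : Int) := by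
  induction preferences generalizing d with
  | nil => simp [vetoLastsSpec]
  | cons pr rest ih =>
    obtain ⟨ag, pref⟩ := pr
    rw [List.foldl_cons]
    by_cases hemp : pref.isEmpty
    · have hnil : pref = [] := by simpa using hemp
      subst hnil
      simp only [List.isEmpty_nil, ite_true]
      rw [ih]
      simp [vetoLastsSpec]
    · have hne : pref ≠ [] := by simpa using hemp
      rw [if_neg (by simpa using hemp)]
      rw [ih, PySem.List.pyGetD_neg_one pref 0 hne]
      have hlasts : vetoLastsSpec ((ag, pref) :: rest)
          = pref.getLast hne :: vetoLastsSpec rest := by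
        simp [vetoLastsSpec, List.getLast?_eq_some_getLast hne]
      rw [hlasts, PySem.Dict.getD_modify, List.count_cons]
      by_cases hz : alt = pref.getLast hne
      · rw [hz]; simp; omega
      · have hz' : ¬ pref.getLast hne = alt := fun h => hz h.symm
        simp [hz, hz']

-- the central fact: the two score dictionaries coincide
theorem veto_points_eq (preferences : List (Int × List Int)) :
    vetoPointsA preferences
      = PySem.Dict.ofList ((vetoAppearances preferences).items.map
          (fun p => (p.1, p.2 - (vetoVetoes preferences).getD p.1 0))) := by
  apply PySem.Dict.ext
  have hAkeys : (vetoPointsA preferences).keys = PySem.Set.ofList (vetoFlatSpec preferences) := by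
    unfold vetoPointsA
    rw [veto_pointsA_keys, PySem.Dict.keys_empty, PySem.Set.ofList_eq_foldl]; rfl
  have hAnodup : (vetoPointsA preferences).keys.Nodup := by
    rw [hAkeys]; exact PySem.Set.nodup_ofList _
  rw [PySem.Dict.items_eq_map_keys _ hAnodup 0, hAkeys]
  -- the right-hand items: appearances are the counter of the flattened rankings
  have hA : (vetoAppearances preferences).items.map
      (fun p => (p.1, p.2 - (vetoVetoes preferences).getD p.1 0))
      = (PySem.Set.ofList (vetoFlatSpec preferences)).map
          (fun k => (k, ((vetoFlatSpec preferences).count k : Int)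
            - (vetoVetoes preferences).getD k 0)) := by
    rw [veto_appear_eq, PySem.Dict.items_counter, List.map_map]; rfl
  have hfresh : ∀ (l : List (Int × Int)), (l.map Prod.fst).Nodup →
      (PySem.Dict.ofList l).items = l := by
    intro l hnd
    have : (l.foldl (fun d (p : Int × Int) => d.insert p.1 p.2) PySem.Dict.empty).items
        = PySem.Dict.empty.items ++ l.map (fun p => (p.1, p.2)) := by
      exact PySem.Dict.items_foldl_insert_fresh l Prod.fst Prod.snd PySem.Dict.empty
        (fun a _ => PySem.Dict.contains_empty a.1) hnd
    simpa using this
  have hndB : (((vetoAppearances preferences).items.map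
      (fun p => (p.1, p.2 - (vetoVetoes preferences).getD p.1 0))).map Prod.fst).Nodup := by
    rw [hA]; simp only [List.map_map, Function.comp_def]
    simp
  rw [hfresh _ hndB, hA]
  apply List.map_congr_left
  intro k hk
  unfold vetoPointsA
  rw [veto_pointsA_getD, PySem.Dict.getD_empty]
  unfold vetoVetoes
  rw [veto_vetoes_getD, PySem.Dict.getD_empty]
  simp

theorem veto_eq_alt (preferences : List (Int × List Int)) (tie_break : Int) :
    veto preferences tie_break = veto_alt preferences tie_break := by
  unfold veto veto_alt
  rw [veto_points_eq]

-- ===== VERDICT (by name: the statement is the Claim_ definition above) =====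
theorem veto_spec : Claim_equal_veto := by
  intro preferences tie_break _ _
  unfold Spec_veto
  exact veto_eq_alt preferences tie_break
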